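-- pv_equiv track=rewrite | github.com/Okarim1/SuperMarioPython | SuperMario.py | snaking
-- ===== SOURCE A (Python) =====
-- def snaking(texto):
--     """
--     texto=nivel en formato de texto
--     secuencia= secuencia de caracteres obtenidos al recorrer el nivel serpenteando
--     """
--     secuencia=[]
--     for i in range(len(texto[0])):
--         for j in range(len(texto)):
--             if(i%2==0):
--                 secuencia.append(texto[j][i])
--             else:
--                 secuencia.append(texto[len(texto)-j-1][i])
--     return secuencia
-- ===== SOURCE B (Python) =====
-- def snaking(texto):
--     rows = len(texto)
--     cols = len(texto[0])
--     secuencia = []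
--     i, j, dj = 0, 0, 1
--     while i < cols:
--         secuencia.append(texto[j][i])
--         if 0 <= j + dj < rows:
--             j = j + dj
--         else:
--             i = i + 1
--             dj = -dj
--     return secuencia
-- ===== Notes on version B (the rewrite author's own statement) =====
-- stated objective: alternative
-- what changed: B simulates the snake as a single while-loop walk over a cursor (i, j) with a direction dj that bounces at the grid edges, instead of A's two nested index loops with a per-element parity branch.
import Mathlib
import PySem

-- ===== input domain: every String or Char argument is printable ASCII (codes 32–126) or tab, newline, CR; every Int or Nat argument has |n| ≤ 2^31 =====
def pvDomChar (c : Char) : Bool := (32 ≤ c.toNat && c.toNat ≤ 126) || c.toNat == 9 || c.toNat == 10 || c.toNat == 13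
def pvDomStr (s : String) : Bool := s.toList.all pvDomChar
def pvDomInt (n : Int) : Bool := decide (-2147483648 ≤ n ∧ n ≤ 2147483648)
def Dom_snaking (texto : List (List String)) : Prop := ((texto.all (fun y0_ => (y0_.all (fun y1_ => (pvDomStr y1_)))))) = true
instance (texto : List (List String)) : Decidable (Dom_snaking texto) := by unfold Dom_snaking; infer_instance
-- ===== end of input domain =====

-- B simulates the snake as a single while-loop walk with a cursor and a bouncing direction,
-- instead of A's nested index loops with a per-element parity branch (alternative, same cost).


-- ===== PORT A =====
-- texto[j][i] ported with PySem.List.pyGetD; under Pre_snaking every index is in range,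
-- so the defaults are never used.
def snaking (texto : List (List String)) : List String :=
  (List.range (PySem.List.pyGetD texto 0 []).length).foldl (fun sec (i : Nat) =>
    (List.range texto.length).foldl (fun sec (j : Nat) =>
      if i % 2 == 0 then
        sec ++ [PySem.List.pyGetD (PySem.List.pyGetD texto (j : Int) []) (i : Int) ""]
      else
        sec ++ [PySem.List.pyGetD (PySem.List.pyGetD texto ((texto.length : Int) - j - 1) []) (i : Int) ""]) sec) []

-- ===== PORT B =====
-- The while loop of Source B as fuel recursion; the loop body runs exactly rows*cols times
-- (one append per iteration), so fuel rows*cols+1 covers every iteration plus the final test.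
def pvWalk (texto : List (List String)) (rows cols : Nat) :
    Nat → Nat → Int → Int → List String → List String
  | 0, _, _, _, acc => acc
  | fuel+1, i, j, dj, acc =>
    if i < cols then
      let acc' := acc ++ [PySem.List.pyGetD (PySem.List.pyGetD texto j []) (i : Int) ""]
      if 0 ≤ j + dj ∧ j + dj < (rows : Int) then
        pvWalk texto rows cols fuel i (j + dj) dj acc'
      else
        pvWalk texto rows cols fuel (i + 1) j (-dj) acc'
    else acc

def snaking_alt (texto : List (List String)) : List String :=
  let rows := texto.length
  let cols := (PySem.List.pyGetD texto 0 []).length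
  pvWalk texto rows cols (rows * cols + 1) 0 0 1 []

-- ===== PRECONDITION & SPEC =====
-- Pre_ excludes exactly the inputs where Python A raises IndexError: the empty grid
-- (texto[0]) and ragged grids where some row is shorter than row 0 (B raises there too).
def Pre_snaking (texto : List (List String)) : Prop :=
  texto ≠ [] ∧ ∀ row ∈ texto, (texto.headD []).length ≤ row.length
instance (texto : List (List String)) : Decidable (Pre_snaking texto) := by unfold Pre_snaking; infer_instance
def pvWitness_snaking : List (List String) := [["a","b"],["c","d"],["e","f"]]

def Spec_snaking (texto : List (List String)) (out : List String) : Prop := out = snaking_alt texto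
instance (texto : List (List String)) (out : List String) : Decidable (Spec_snaking texto out) := by unfold Spec_snaking; infer_instance

-- ===== CLAIM (what is proved, stated in full; the proofs are below) =====
def Claim_equal_snaking : Prop := ∀ (texto : List (List String)), Dom_snaking texto → Pre_snaking texto → Spec_snaking texto (snaking texto)

-- ===== LEMMAS AND PROOFS =====

-- cell j i = texto[j][i] (Int row index, as in the walk state)
def pvCell (texto : List (List String)) (j : Int) (i : Nat) : String :=
  PySem.List.pyGetD (PySem.List.pyGetD texto j []) (i : Int) ""

def pvCol (texto : List (List String)) (i : Nat) : List String :=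
  (List.range texto.length).map (fun (j : Nat) => pvCell texto ((j : Nat) : Int) i)

def pvOrient (texto : List (List String)) (i : Nat) : List String :=
  if i % 2 = 0 then pvCol texto i else (pvCol texto i).reverse

-- reversing [f 0, …, f (n-1)] is listing f (n-1-j) for j = 0, …, n-1
theorem pv_map_range_reverse {α : Type} (f : Nat → α) (n : Nat) :
    (List.range n).map (fun j => f (n - 1 - j)) = ((List.range n).map f).reverse := by
  rw [← List.map_reverse]
  have h : (List.range n).reverse = (List.range n).map (fun j => n - 1 - j) := by
    simp [List.range_eq_range', List.reverse_range']
  rw [h, List.map_map]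
  rfl

-- walking DOWN the last k cells of column i (j = rows-k ... rows-1, dj = 1) appends them
-- in order and leaves the cursor at (i+1, rows-1, -1)
theorem pv_map_range_shift {α : Type} (f : Int → α) (a : Int) (k : Nat) :
    (List.range (k + 1)).map (fun (m : Nat) => f (a + (m : Int)))
      = f a :: (List.range k).map (fun (m : Nat) => f (a + 1 + (m : Int))) := by
  rw [List.range_succ_eq_map, List.map_cons, List.map_map]
  simp only [Nat.cast_zero, add_zero]
  congr 1
  apply List.map_congr_left
  intro m _
  show f (a + ((m + 1 : Nat) : Int)) = f (a + 1 + (m : Int))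
  congr 1
  push_cast
  ring

theorem pv_map_range_shift_neg {α : Type} (f : Int → α) (a : Int) (k : Nat) :
    (List.range (k + 1)).map (fun (m : Nat) => f (a - (m : Int)))
      = f a :: (List.range k).map (fun (m : Nat) => f (a - 1 - (m : Int))) := by
  rw [List.range_succ_eq_map, List.map_cons, List.map_map]
  simp only [Nat.cast_zero, sub_zero]
  congr 1
  apply List.map_congr_left
  intro m _
  show f (a - ((m + 1 : Nat) : Int)) = f (a - 1 - (m : Int))
  congr 1
  push_cast
  ring

theorem pv_walk_down (texto : List (List String)) (cols : Nat) :
    ∀ (k : Nat), 1 ≤ k → k ≤ texto.length → ∀ (f i : Nat), i < cols → ∀ (acc : List String),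
    pvWalk texto texto.length cols (k + f) i ((texto.length : Int) - k) 1 acc
      = pvWalk texto texto.length cols f (i + 1) ((texto.length : Int) - 1) (-1)
          (acc ++ (List.range k).map (fun (m : Nat) => pvCell texto ((texto.length : Int) - k + (m : Int)) i)) := by
  intro k
  induction k with
  | zero => omega
  | succ k ih =>
    intro _ hk f i hi acc
    match k, ih with
    | 0, _ =>
      have h1 : (0:Nat) + 1 + f = f + 1 := by omega
      rw [h1]
      simp only [pvWalk, if_pos hi, Nat.zero_add, Nat.cast_one]
      rw [if_neg (by omega : ¬ (0 ≤ (texto.length : Int) - 1 + 1 ∧ (texto.length : Int) - 1 + 1 < (texto.length : Int)))]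
      simp [pvCell, List.range_one]
    | k+1, ih =>
      have hstep : (k + 1 + 1) + f = ((k + 1) + f) + 1 := by omega
      rw [hstep]
      simp only [pvWalk, if_pos hi]
      have hc : 0 ≤ (texto.length : Int) - ((k + 1 + 1 : Nat) : Int) + 1 ∧ (texto.length : Int) - ((k + 1 + 1 : Nat) : Int) + 1 < (texto.length : Int) := by
        push_cast; omega
      rw [if_pos hc]
      have hj : (texto.length : Int) - ((k + 1 + 1 : Nat) : Int) + 1 = (texto.length : Int) - ((k + 1 : Nat) : Int) := by push_cast; ring
      rw [hj, ih (by omega) (by omega) f i hi]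
      congr 1
      rw [List.append_assoc]
      congr 1
      rw [pv_map_range_shift (fun j => pvCell texto j i) ((texto.length : Int) - ((k + 1 + 1 : Nat) : Int)) (k + 1),
          (by push_cast; ring : (texto.length : Int) - ((k + 1 + 1 : Nat) : Int) + 1 = (texto.length : Int) - ((k + 1 : Nat) : Int))]
      rfl

-- walking UP the first k cells of column i (j = k-1 ... 0, dj = -1) appends them in
-- descending row order and leaves the cursor at (i+1, 0, 1)
theorem pv_walk_up (texto : List (List String)) (cols : Nat) :
    ∀ (k : Nat), 1 ≤ k → k ≤ texto.length → ∀ (f i : Nat), i < cols → ∀ (acc : List String),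
    pvWalk texto texto.length cols (k + f) i ((k : Int) - 1) (-1) acc
      = pvWalk texto texto.length cols f (i + 1) 0 1
          (acc ++ (List.range k).map (fun (m : Nat) => pvCell texto ((k : Int) - 1 - (m : Int)) i)) := by
  intro k
  induction k with
  | zero => omega
  | succ k ih =>
    intro _ hk f i hi acc
    match k, ih with
    | 0, _ =>
      have h1 : (0:Nat) + 1 + f = f + 1 := by omega
      rw [h1]
      simp only [pvWalk, if_pos hi, Nat.zero_add, Nat.cast_one]
      rw [if_neg (by omega : ¬ (0 ≤ (1 : Int) - 1 + (-1) ∧ (1 : Int) - 1 + (-1) < (texto.length : Int)))]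
      norm_num [pvCell, List.range_one]
    | k+1, ih =>
      have hstep : (k + 1 + 1) + f = ((k + 1) + f) + 1 := by omega
      rw [hstep]
      simp only [pvWalk, if_pos hi]
      have hc : 0 ≤ (((k + 1 + 1 : Nat) : Int) - 1) + (-1) ∧ (((k + 1 + 1 : Nat) : Int) - 1) + (-1) < (texto.length : Int) := by
        push_cast; omega
      rw [if_pos hc]
      have hj : (((k + 1 + 1 : Nat) : Int) - 1) + (-1) = ((k + 1 : Nat) : Int) - 1 := by push_cast; ring
      rw [hj, ih (by omega) (by omega) f i hi]
      congr 1
      rw [List.append_assoc]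
      congr 1
      rw [pv_map_range_shift_neg (fun j => pvCell texto j i) (((k + 1 + 1 : Nat) : Int) - 1) (k + 1),
          (by push_cast; ring : (((k + 1 + 1 : Nat) : Int) - 1) - 1 = ((k + 1 : Nat) : Int) - 1)]
      rfl

-- main invariant: with c columns left, the cursor at the parity-determined end of column i,
-- the walk appends exactly the oriented remaining columns
theorem pv_walk_main (texto : List (List String)) (cols : Nat) (hrows : 1 ≤ texto.length) :
    ∀ (c i : Nat), i + c = cols → ∀ (acc : List String),
    pvWalk texto texto.length cols (c * texto.length + 1) i
        (if i % 2 = 0 then 0 else (texto.length : Int) - 1)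
        (if i % 2 = 0 then 1 else -1) acc
      = acc ++ (List.range c).flatMap (fun d => pvOrient texto (i + d)) := by
  intro c
  induction c with
  | zero =>
    intro i hic acc
    have : ¬ i < cols := by omega
    simp [pvWalk, this]
  | succ c ih =>
    intro i hic acc
    have hi : i < cols := by omega
    have hfuel : (c + 1) * texto.length + 1 = texto.length + (c * texto.length + 1) := by ring
    rw [hfuel]
    have hsplit : (List.range (c + 1)).flatMap (fun d => pvOrient texto (i + d))
        = pvOrient texto i ++ (List.range c).flatMap (fun d => pvOrient texto ((i + 1) + d)) := by
      rw [List.range_succ_eq_map, List.flatMap_cons, List.flatMap_map]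
      have hfun : (fun d => pvOrient texto (i + (d + 1))) = (fun d => pvOrient texto ((i + 1) + d)) := by
        funext d; congr 1; omega
      simp only [Nat.add_zero, Nat.succ_eq_add_one, hfun]
    by_cases hpar : i % 2 = 0
    · rw [if_pos hpar, if_pos hpar]
      have h0 : (0 : Int) = (texto.length : Int) - texto.length := by omega
      rw [h0, pv_walk_down texto cols texto.length hrows le_rfl _ i hi acc]
      have hcol : (List.range texto.length).map (fun (m : Nat) => pvCell texto ((texto.length : Int) - texto.length + (m : Int)) i) = pvCol texto i := by
        apply List.map_congr_left
        intro m _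
        congr 1
        omega
      have hpar1 : ¬ (i + 1) % 2 = 0 := by omega
      have h2 := ih (i + 1) (by omega) (acc ++ pvCol texto i)
      rw [if_neg hpar1, if_neg hpar1] at h2
      rw [hcol, h2, hsplit, pvOrient, if_pos hpar, List.append_assoc]
    · rw [if_neg hpar, if_neg hpar]
      have hlen : ((texto.length : Nat) : Int) - 1 = ((texto.length : Nat) : Int) - 1 := rfl
      rw [pv_walk_up texto cols texto.length hrows le_rfl _ i hi acc]
      have hcol : (List.range texto.length).map (fun (m : Nat) => pvCell texto ((texto.length : Int) - 1 - (m : Int)) i) = (pvCol texto i).reverse := by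
        rw [pvCol, ← pv_map_range_reverse (fun (j : Nat) => pvCell texto ((j : Nat) : Int) i) texto.length]
        apply List.map_congr_left
        intro m hm
        have hm' : m < texto.length := List.mem_range.mp hm
        show pvCell texto ((texto.length : Int) - 1 - (m : Int)) i = pvCell texto ((texto.length - 1 - m : Nat) : Int) i
        congr 1
        omega
      have hpar1 : (i + 1) % 2 = 0 := by omega
      have h2 := ih (i + 1) (by omega) (acc ++ (pvCol texto i).reverse)
      rw [if_pos hpar1, if_pos hpar1] at h2
      rw [hcol, h2, hsplit, pvOrient, if_neg hpar, List.append_assoc]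

-- A's nested folds produce exactly the oriented columns in order
theorem pv_snaking_flatMap (texto : List (List String)) :
    snaking texto = (List.range (PySem.List.pyGetD texto 0 []).length).flatMap (pvOrient texto) := by
  unfold snaking
  have hbody : ∀ (sec : List String) (i : Nat), i ∈ List.range (PySem.List.pyGetD texto 0 []).length →
      ((List.range texto.length).foldl (fun sec (j : Nat) =>
        if i % 2 == 0 then
          sec ++ [PySem.List.pyGetD (PySem.List.pyGetD texto (j : Int) []) (i : Int) ""]
        else
          sec ++ [PySem.List.pyGetD (PySem.List.pyGetD texto ((texto.length : Int) - j - 1) []) (i : Int) ""]) sec)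
      = sec ++ pvOrient texto i := by
    intro sec i _
    by_cases h : i % 2 = 0
    · have h0 : (i % 2 == 0) = true := by simp [h]
      simp only [h0, if_true]
      rw [PySem.List.foldl_append_singleton_eq_map]
      rw [pvOrient, if_pos h, pvCol]
      rfl
    · have h0 : (i % 2 == 0) = false := by simp [h]
      simp only [h0, Bool.false_eq_true, if_false]
      rw [PySem.List.foldl_append_singleton_eq_map]
      have hmap : (List.range texto.length).map (fun (j : Nat) =>
            PySem.List.pyGetD (PySem.List.pyGetD texto ((texto.length : Int) - j - 1) []) (i : Int) "")
          = (pvCol texto i).reverse := by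
        rw [pvCol, ← pv_map_range_reverse (fun (j : Nat) => pvCell texto ((j : Nat) : Int) i) texto.length]
        apply List.map_congr_left
        intro m hm
        have hm' : m < texto.length := List.mem_range.mp hm
        show PySem.List.pyGetD (PySem.List.pyGetD texto ((texto.length : Int) - m - 1) []) (i : Int) ""
            = pvCell texto ((texto.length - 1 - m : Nat) : Int) i
        unfold pvCell
        congr 2
        omega
      rw [hmap, pvOrient, if_neg h]
  rw [PySem.List.foldl_congr_mem (h := hbody), PySem.List.foldl_append_eq_flatMap]
  simp

-- ===== VERDICT (by name: the statement is the Claim_ definition above) =====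
theorem snaking_spec : Claim_equal_snaking := by
  intro texto _ hpre
  unfold Spec_snaking snaking_alt
  have hrows : 1 ≤ texto.length := by
    rcases hpre with ⟨hne, _⟩
    cases texto with
    | nil => exact absurd rfl hne
    | cons a l => simp
  rw [pv_snaking_flatMap]
  have hmain := pv_walk_main texto (PySem.List.pyGetD texto 0 []).length hrows
      (PySem.List.pyGetD texto 0 []).length 0 (by omega) []
  norm_num at hmain
  show List.flatMap (pvOrient texto) (List.range (PySem.List.pyGetD texto 0 []).length)
      = pvWalk texto texto.length (PySem.List.pyGetD texto 0 []).length
          (texto.length * (PySem.List.pyGetD texto 0 []).length + 1) 0 0 1 []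
  rw [Nat.mul_comm, hmain]
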